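-- pv_equiv track=rewrite | github.com/Michaszek224/praktykaiszeregowaniezadan | zadanie1/algorytmy/151893.py | compute_total_lateness
-- ===== SOURCE A (Python) =====
-- def compute_total_lateness(batches, s):
--     time_now = 0
--     total_lateness = 0
--     for batch in batches:
--         time_now += s + sum(t['p'] for t in batch)
--         for t in batch:
--             total_lateness += max(0, time_now - t['d'])
--     return total_lateness
-- ===== SOURCE B (Python) =====
-- def compute_total_lateness(batches, s):
--     bs = list(batches)
--
--     def solve(lo, hi, t0):
--         # (total lateness of batches bs[lo:hi] when the machine is free at t0,
--         #  total time those batches occupy, setups included)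
--         n = hi - lo
--         if n == 0:
--             return 0, 0
--         if n == 1:
--             batch = bs[lo]
--             delta = s + sum(t['p'] for t in batch)
--             c = t0 + delta
--             return sum(max(0, c - t['d']) for t in batch), delta
--         mid = lo + n // 2
--         l_late, l_delta = solve(lo, mid, t0)
--         r_late, r_delta = solve(mid, hi, t0 + l_delta)
--         return l_late + r_late, l_delta + r_delta
--
--     return solve(0, len(bs), 0)[0]
-- ===== Notes on version B (the rewrite author's own statement) =====
-- stated objective: alternative
-- what changed: B replaces A's single left-to-right scan carrying a running clock by a divide-and-conquer recursion: each half independently returns (lateness, occupied time) and the right half is solved with the left half's total duration as its start offset.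
import Mathlib
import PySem

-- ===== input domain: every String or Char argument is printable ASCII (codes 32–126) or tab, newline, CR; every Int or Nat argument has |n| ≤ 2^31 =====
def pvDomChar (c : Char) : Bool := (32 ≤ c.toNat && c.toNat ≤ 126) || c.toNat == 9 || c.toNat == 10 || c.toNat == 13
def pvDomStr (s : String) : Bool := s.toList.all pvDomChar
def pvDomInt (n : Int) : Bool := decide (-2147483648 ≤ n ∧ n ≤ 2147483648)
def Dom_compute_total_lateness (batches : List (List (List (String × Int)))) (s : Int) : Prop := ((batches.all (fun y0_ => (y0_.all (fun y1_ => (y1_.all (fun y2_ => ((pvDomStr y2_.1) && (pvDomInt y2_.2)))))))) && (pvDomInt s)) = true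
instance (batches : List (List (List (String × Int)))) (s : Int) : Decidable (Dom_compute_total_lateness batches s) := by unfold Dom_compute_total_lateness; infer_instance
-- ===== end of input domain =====

-- B replaces A's single running-clock scan by a divide-and-conquer recursion returning (lateness, occupied time) per half; alternative decomposition, same cost.


-- dict lookup t[k] : first match in the association list; 0 only off Pre_ (Python raises KeyError there)
def pvLookD (t : List (String × Int)) (k : String) : Int := ((t.lookup k).getD 0)

-- ===== PORT A =====
-- one pass: fold carrying (time_now, total_lateness)
def compute_total_lateness (batches : List (List (List (String × Int)))) (s : Int) : Int :=
  (batches.foldl (fun (st : Int × Int) batch =>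
      let time_now := st.1 + (s + batch.foldl (fun a t => a + pvLookD t "p") 0)
      (time_now, batch.foldl (fun a t => a + max 0 (time_now - pvLookD t "d")) st.2))
    (0, 0)).2

-- ===== PORT B =====
-- divide and conquer: solve bs t0 = (lateness of bs started when the machine is free at t0,
-- total time bs occupies); the right half starts offset by the left half's duration
def pvSolve (s : Int) (bs : List (List (List (String × Int)))) (t0 : Int) : Int × Int :=
  match bs with
  | [] => (0, 0)
  | [batch] =>
    let delta := s + batch.foldl (fun a t => a + pvLookD t "p") 0
    let c := t0 + delta
    (batch.foldl (fun a t => a + max 0 (c - pvLookD t "d")) 0, delta)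
  | a :: b :: rest =>
    let k := (a :: b :: rest).length / 2
    let l := pvSolve s ((a :: b :: rest).take k) t0
    let r := pvSolve s ((a :: b :: rest).drop k) (t0 + l.2)
    (l.1 + r.1, l.2 + r.2)
termination_by bs.length
decreasing_by
  · simp [List.length_take]; omega
  · simp [List.length_drop]; omega

def compute_total_lateness_alt (batches : List (List (List (String × Int)))) (s : Int) : Int :=
  (pvSolve s batches 0).1

-- ===== PRECONDITION & SPEC =====
-- Pre_: every task dict carries keys "p" and "d"; otherwise Python A raises KeyError.
def Pre_compute_total_lateness (batches : List (List (List (String × Int)))) (s : Int) : Prop :=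
  ∀ b ∈ batches, ∀ t ∈ b, (t.lookup "p").isSome ∧ (t.lookup "d").isSome
instance (batches : List (List (List (String × Int)))) (s : Int) : Decidable (Pre_compute_total_lateness batches s) := by unfold Pre_compute_total_lateness; infer_instance

def pvWitness_compute_total_lateness : (List (List (List (String × Int)))) × Int :=
  ([[[("p", 2), ("d", 3)], [("p", 1), ("d", 1)]], [[("p", 4), ("d", 2)]]], 1)

def Spec_compute_total_lateness (batches : List (List (List (String × Int)))) (s : Int) (out : Int) : Prop := out = compute_total_lateness_alt batches s
instance (batches : List (List (List (String × Int)))) (s : Int) (out : Int) : Decidable (Spec_compute_total_lateness batches s out) := by unfold Spec_compute_total_lateness; infer_instance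

-- ===== CLAIM (what is proved, stated in full; the proofs are below) =====
def Claim_equal_compute_total_lateness : Prop := ∀ (batches : List (List (List (String × Int)))) (s : Int), Dom_compute_total_lateness batches s → Pre_compute_total_lateness batches s → Spec_compute_total_lateness batches s (compute_total_lateness batches s)

-- ===== LEMMAS AND PROOFS =====
-- pulling the accumulator out of a sum-fold
theorem pvFoldShift (g : List (String × Int) → Int) :
    ∀ (l : List (List (String × Int))) (acc : Int),
      l.foldl (fun a t => a + g t) acc = acc + l.foldl (fun a t => a + g t) 0 := by
  intro l
  induction l with
  | nil => intro acc; simp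
  | cons h t ih =>
    intro acc
    rw [List.foldl_cons, List.foldl_cons, ih, ih (0 + g h)]
    ring

-- A's fold over bs, starting the clock at t0 with accumulated lateness acc,
-- equals (t0 + duration, acc + lateness) as computed by B's divide-and-conquer.
theorem pvKey (s : Int) (bs : List (List (List (String × Int)))) (t0 : Int) :
    ∀ acc : Int,
      bs.foldl (fun (st : Int × Int) batch =>
          let time_now := st.1 + (s + batch.foldl (fun a t => a + pvLookD t "p") 0)
          (time_now, batch.foldl (fun a t => a + max 0 (time_now - pvLookD t "d")) st.2))
        (t0, acc)
      = (t0 + (pvSolve s bs t0).2, acc + (pvSolve s bs t0).1) := by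
  fun_induction pvSolve s bs t0 with
  | case1 => simp
  | case2 t0 batch =>
    intro acc
    simp only [List.foldl, Prod.mk.injEq]
    refine ⟨trivial, ?_⟩
    exact pvFoldShift (fun t => max 0 (t0 + (s + List.foldl (fun a t => a + pvLookD t "p") 0 batch) - pvLookD t "d")) batch acc
  | case3 t0 a b rest k l r ihtake =>
    rename_i _ ihdrop
    intro acc
    have hl : l = pvSolve s ((a :: b :: rest).take k) t0 := rfl
    have hr : r = pvSolve s ((a :: b :: rest).drop k) (t0 + (pvSolve s ((a :: b :: rest).take k) t0).2) := rfl
    have hfold : (a :: b :: rest).foldl (fun (st : Int × Int) batch =>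
          let time_now := st.1 + (s + batch.foldl (fun a t => a + pvLookD t "p") 0)
          (time_now, batch.foldl (fun a t => a + max 0 (time_now - pvLookD t "d")) st.2)) (t0, acc)
        = ((a :: b :: rest).drop k).foldl (fun (st : Int × Int) batch =>
          let time_now := st.1 + (s + batch.foldl (fun a t => a + pvLookD t "p") 0)
          (time_now, batch.foldl (fun a t => a + max 0 (time_now - pvLookD t "d")) st.2))
          (((a :: b :: rest).take k).foldl (fun (st : Int × Int) batch =>
          let time_now := st.1 + (s + batch.foldl (fun a t => a + pvLookD t "p") 0)
          (time_now, batch.foldl (fun a t => a + max 0 (time_now - pvLookD t "d")) st.2)) (t0, acc)) := by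
      conv_lhs => rw [← List.take_append_drop k (a :: b :: rest)]
      rw [List.foldl_append]
    have hd := ihdrop (acc + (pvSolve s ((a :: b :: rest).take k) t0).1)
    rw [hl] at hd
    rw [hl, hr]
    rw [hfold, ihtake acc, hd]
    exact Prod.ext (by dsimp; ring) (by dsimp; ring)

-- ===== VERDICT (by name: the statement is the Claim_ definition above) =====
theorem compute_total_lateness_spec : Claim_equal_compute_total_lateness := by
  intro batches s _ _
  unfold Spec_compute_total_lateness compute_total_lateness compute_total_lateness_alt
  rw [pvKey s batches 0 0]
  simp
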